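-- pv_equiv track=rewrite | github.com/diyjac/SDC-P4 | attempts/monolithic/test16.py | find_lane_nearest_neighbors
-- ===== SOURCE A (Python) =====
-- def find_lane_nearest_neighbors(histogram, lastleftpos, lastrightpos, nneighbors):
--     ncol = len(histogram)-1
--     leftx = []
--     rightx = []
--     left = {"count":0, "position":lastleftpos}
--     right = {"count":0, "position":lastrightpos}
--     for i in range(nneighbors):
--         if histogram[lastleftpos+i] > 0:
--             leftx.append(lastleftpos+i)
--             if left['count'] < histogram[lastleftpos+i]:
--                 left['count'] = histogram[lastleftpos+i]
--                 left['position'] = lastleftpos+i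
--         if (lastleftpos-i) > 0 and histogram[lastleftpos-i] > 0:
--             leftx.append(lastleftpos-i)
--             if left['count'] < histogram[lastleftpos-i]:
--                 left['count'] = histogram[lastleftpos-i]
--                 left['position'] = lastleftpos-i
--         if (lastrightpos+i)< ncol and histogram[lastrightpos+i] > 0:
--             rightx.append(lastrightpos+i)
--             if right['count'] < histogram[lastrightpos+i]:
--                 right['count'] = histogram[lastrightpos+i]
--                 right['position'] = lastrightpos+i
--         if histogram[lastrightpos-i] > 0:
--             rightx.append(lastrightpos-i)
--             if right['count'] < histogram[lastrightpos-i]: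
--                 right['count'] = histogram[lastrightpos-i]
--                 right['position'] = lastrightpos-i
--     return left['position'], right['position'], leftx, rightx
-- ===== SOURCE B (Python) =====
-- def find_lane_nearest_neighbors(histogram, lastleftpos, lastrightpos, nneighbors):
--     ncol = len(histogram) - 1
--     leftx = []
--     rightx = []
--     for i in range(nneighbors):
--         if histogram[lastleftpos+i] > 0:
--             leftx.append(lastleftpos+i)
--         if (lastleftpos-i) > 0 and histogram[lastleftpos-i] > 0:
--             leftx.append(lastleftpos-i)
--         if (lastrightpos+i) < ncol and histogram[lastrightpos+i] > 0:
--             rightx.append(lastrightpos+i)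
--         if histogram[lastrightpos-i] > 0:
--             rightx.append(lastrightpos-i)
--     leftpeak = max(leftx, key=lambda p: histogram[p], default=lastleftpos)
--     rightpeak = max(rightx, key=lambda p: histogram[p], default=lastrightpos)
--     return leftpeak, rightpeak, leftx, rightx
-- ===== Notes on version B (the rewrite author's own statement) =====
-- stated objective: simpler
-- what changed: The loop now only collects the leftx/rightx neighbor lists (same interleaved order and guards); the in-loop count/position tracking dicts are removed and each peak is computed afterwards with one max(xs, key=lambda p: histogram[p], default=last*pos) reduction, matching A's first-maximal tie-breaking.
import Mathlib
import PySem

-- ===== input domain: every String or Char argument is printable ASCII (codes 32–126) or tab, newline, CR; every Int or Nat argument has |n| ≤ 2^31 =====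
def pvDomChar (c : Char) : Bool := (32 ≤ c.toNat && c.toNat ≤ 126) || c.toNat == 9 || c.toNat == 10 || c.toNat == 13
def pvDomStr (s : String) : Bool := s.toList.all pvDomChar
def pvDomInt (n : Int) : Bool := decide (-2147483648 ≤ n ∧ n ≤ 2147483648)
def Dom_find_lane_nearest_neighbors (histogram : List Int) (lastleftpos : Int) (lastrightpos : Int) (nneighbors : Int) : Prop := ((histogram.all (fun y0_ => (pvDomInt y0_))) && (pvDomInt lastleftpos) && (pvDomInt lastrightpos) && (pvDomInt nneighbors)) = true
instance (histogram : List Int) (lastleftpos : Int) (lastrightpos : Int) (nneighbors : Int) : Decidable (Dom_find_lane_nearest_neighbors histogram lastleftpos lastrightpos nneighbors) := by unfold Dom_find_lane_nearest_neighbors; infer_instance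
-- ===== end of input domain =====

-- B (simpler decomposition): the loop only collects leftx/rightx; the two peaks are computed
-- afterwards by one max(…, key=histogram lookup, default=last*pos) reduction each, instead of
-- A's in-loop count/position tracking dictionaries.  Same cost; equivalence proved on Pre_.

-- ===== PORT A =====
-- histogram[p] with Python (possibly negative) indexing; default 0 only reachable outside Pre_
def pvKey (h : List Int) (p : Int) : Int := PySem.List.pyGetD h p 0

-- A's "if count < histogram[x]: count, position := histogram[x], x" update on a (count, position) pair
def pvUpd (h : List Int) (c : Int × Int) (x : Int) : Int × Int :=
  if c.1 < pvKey h x then (pvKey h x, x) else c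

-- one iteration of A's loop: state = ((leftx, rightx), (left, right)) with left/right = (count, position)
def pvStepA (h : List Int) (ll lr ncol : Int)
    (st : (List Int × List Int) × ((Int × Int) × (Int × Int))) (i : Int) :
    (List Int × List Int) × ((Int × Int) × (Int × Int)) :=
  let s1 := if 0 < pvKey h (ll + i) then
      ((st.1.1 ++ [ll + i], st.1.2), (pvUpd h st.2.1 (ll + i), st.2.2)) else st
  let s2 := if 0 < ll - i ∧ 0 < pvKey h (ll - i) then
      ((s1.1.1 ++ [ll - i], s1.1.2), (pvUpd h s1.2.1 (ll - i), s1.2.2)) else s1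
  let s3 := if lr + i < ncol ∧ 0 < pvKey h (lr + i) then
      ((s2.1.1, s2.1.2 ++ [lr + i]), (s2.2.1, pvUpd h s2.2.2 (lr + i))) else s2
  if 0 < pvKey h (lr - i) then
      ((s3.1.1, s3.1.2 ++ [lr - i]), (s3.2.1, pvUpd h s3.2.2 (lr - i))) else s3

def find_lane_nearest_neighbors (histogram : List Int) (lastleftpos : Int) (lastrightpos : Int) (nneighbors : Int) : Int × Int × List Int × List Int :=
  let ncol : Int := (histogram.length : Int) - 1
  let st := (PySem.List.pyRange 0 nneighbors 1).foldl
      (pvStepA histogram lastleftpos lastrightpos ncol)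
      (([], []), ((0, lastleftpos), (0, lastrightpos)))
  (st.2.1.2, st.2.2.2, st.1.1, st.1.2)

-- ===== PORT B =====
-- one iteration of B's loop: state = (leftx, rightx) only
def pvStepB (h : List Int) (ll lr ncol : Int) (p : List Int × List Int) (i : Int) :
    List Int × List Int :=
  let lx := if 0 < pvKey h (ll + i) then p.1 ++ [ll + i] else p.1
  let lx := if 0 < ll - i ∧ 0 < pvKey h (ll - i) then lx ++ [ll - i] else lx
  let rx := if lr + i < ncol ∧ 0 < pvKey h (lr + i) then p.2 ++ [lr + i] else p.2
  let rx := if 0 < pvKey h (lr - i) then rx ++ [lr - i] else rx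
  (lx, rx)

def find_lane_nearest_neighbors_alt (histogram : List Int) (lastleftpos : Int) (lastrightpos : Int) (nneighbors : Int) : Int × Int × List Int × List Int :=
  let ncol : Int := (histogram.length : Int) - 1
  let p := (PySem.List.pyRange 0 nneighbors 1).foldl
      (pvStepB histogram lastleftpos lastrightpos ncol) ([], [])
  (PySem.List.maxD p.1 (pvKey histogram) lastleftpos,
   PySem.List.maxD p.2 (pvKey histogram) lastrightpos, p.1, p.2)

-- ===== PRECONDITION & SPEC =====
-- Pre_ excludes exactly the inputs on which Python A raises IndexError: bounds under which every
-- index the loop reads (the two unguarded ones for every i, the two guarded ones when their guard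
-- holds) is a valid Python index of histogram.
def Pre_find_lane_nearest_neighbors (histogram : List Int) (lastleftpos : Int) (lastrightpos : Int) (nneighbors : Int) : Prop :=
  nneighbors ≤ 0 ∨
    (-(histogram.length : Int) ≤ lastleftpos ∧
     lastleftpos + nneighbors - 1 < (histogram.length : Int) ∧
     -(histogram.length : Int) ≤ lastrightpos - (nneighbors - 1) ∧
     lastrightpos < (histogram.length : Int))
instance (histogram : List Int) (lastleftpos : Int) (lastrightpos : Int) (nneighbors : Int) : Decidable (Pre_find_lane_nearest_neighbors histogram lastleftpos lastrightpos nneighbors) := by unfold Pre_find_lane_nearest_neighbors; infer_instance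

def pvWitness_find_lane_nearest_neighbors : List Int × Int × Int × Int := ([1, 2, 3], 1, 2, 1)

def Spec_find_lane_nearest_neighbors (histogram : List Int) (lastleftpos : Int) (lastrightpos : Int) (nneighbors : Int) (out : Int × Int × List Int × List Int) : Prop := out = find_lane_nearest_neighbors_alt histogram lastleftpos lastrightpos nneighbors
instance (histogram : List Int) (lastleftpos : Int) (lastrightpos : Int) (nneighbors : Int) (out : Int × Int × List Int × List Int) : Decidable (Spec_find_lane_nearest_neighbors histogram lastleftpos lastrightpos nneighbors out) := by unfold Spec_find_lane_nearest_neighbors; infer_instance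

-- ===== CLAIM (what is proved, stated in full; the proofs are below) =====
def Claim_equal_find_lane_nearest_neighbors : Prop := ∀ (histogram : List Int) (lastleftpos : Int) (lastrightpos : Int) (nneighbors : Int), Dom_find_lane_nearest_neighbors histogram lastleftpos lastrightpos nneighbors → Pre_find_lane_nearest_neighbors histogram lastleftpos lastrightpos nneighbors → Spec_find_lane_nearest_neighbors histogram lastleftpos lastrightpos nneighbors (find_lane_nearest_neighbors histogram lastleftpos lastrightpos nneighbors)

-- ===== LEMMAS AND PROOFS =====
-- the elements appended to leftx (resp. rightx) during iteration i
def pvEL (h : List Int) (ll : Int) (i : Int) : List Int :=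
  (if 0 < pvKey h (ll + i) then [ll + i] else []) ++
  (if 0 < ll - i ∧ 0 < pvKey h (ll - i) then [ll - i] else [])
def pvER (h : List Int) (lr ncol : Int) (i : Int) : List Int :=
  (if lr + i < ncol ∧ 0 < pvKey h (lr + i) then [lr + i] else []) ++
  (if 0 < pvKey h (lr - i) then [lr - i] else [])

lemma pvStepA_eq (h : List Int) (ll lr ncol : Int) (st : (List Int × List Int) × ((Int × Int) × (Int × Int))) (i : Int) :
    pvStepA h ll lr ncol st i =
      ((st.1.1 ++ pvEL h ll i, st.1.2 ++ pvER h lr ncol i),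
       ((pvEL h ll i).foldl (pvUpd h) st.2.1, (pvER h lr ncol i).foldl (pvUpd h) st.2.2)) := by
  simp only [pvStepA, pvEL, pvER]
  split_ifs <;> simp [List.foldl, List.append_assoc]

lemma pvStepB_eq (h : List Int) (ll lr ncol : Int) (p : List Int × List Int) (i : Int) :
    pvStepB h ll lr ncol p i = (p.1 ++ pvEL h ll i, p.2 ++ pvER h lr ncol i) := by
  simp only [pvStepB, pvEL, pvER]
  split_ifs <;> simp [List.append_assoc]

lemma pvLoopB_eq (h : List Int) (ll lr ncol : Int) (L : List Int) :
    ∀ (p : List Int × List Int),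
      L.foldl (pvStepB h ll lr ncol) p =
        (p.1 ++ L.flatMap (pvEL h ll), p.2 ++ L.flatMap (pvER h lr ncol)) := by
  induction L with
  | nil => intro p; simp
  | cons i L ih =>
      intro p
      simp only [List.foldl_cons, pvStepB_eq, List.flatMap_cons, ih, List.append_assoc]

lemma pvLoopA_eq (h : List Int) (ll lr ncol : Int) (L : List Int) :
    ∀ (st : (List Int × List Int) × ((Int × Int) × (Int × Int))),
      L.foldl (pvStepA h ll lr ncol) st =
        ((st.1.1 ++ L.flatMap (pvEL h ll), st.1.2 ++ L.flatMap (pvER h lr ncol)),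
         ((L.flatMap (pvEL h ll)).foldl (pvUpd h) st.2.1,
          (L.flatMap (pvER h lr ncol)).foldl (pvUpd h) st.2.2)) := by
  induction L with
  | nil => intro st; simp
  | cons i L ih =>
      intro st
      simp only [List.foldl_cons, pvStepA_eq, List.flatMap_cons, ih, List.append_assoc,
        List.foldl_append]

lemma pvEL_pos (h : List Int) (ll : Int) (i x : Int) (hx : x ∈ pvEL h ll i) : 0 < pvKey h x := by
  simp only [pvEL, List.mem_append] at hx
  rcases hx with hx | hx <;> split at hx <;> simp_all

lemma pvER_pos (h : List Int) (lr ncol : Int) (i x : Int) (hx : x ∈ pvER h lr ncol i) : 0 < pvKey h x := by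
  simp only [pvER, List.mem_append] at hx
  rcases hx with hx | hx <;> split at hx <;> simp_all

-- the running (count, position) fold, seeded with an element m, is the running Python max
lemma pvUpd_fold_seeded (h : List Int) (dl : List Int) :
    ∀ m : Int, ∃ m' : Int,
      PySem.List.max? (m :: dl) (pvKey h) = some m' ∧
      dl.foldl (pvUpd h) (pvKey h m, m) = (pvKey h m', m') := by
  induction dl with
  | nil => intro m; exact ⟨m, by simp [PySem.List.max?], rfl⟩
  | cons x t ih =>
      intro m
      have hmax : PySem.List.max? (m :: x :: t) (pvKey h) =
          PySem.List.max? ((if pvKey h m < pvKey h x then x else m) :: t) (pvKey h) := by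
        simp only [PySem.List.max?, List.foldl_cons]
        split_ifs <;> rfl
      simp only [List.foldl_cons, pvUpd, hmax]
      split_ifs with hc
      · exact ih x
      · exact ih m

lemma pvUpd_fold_peak (h : List Int) (dl : List Int) (p0 : Int)
    (hpos : ∀ x ∈ dl, 0 < pvKey h x) :
    (dl.foldl (pvUpd h) (0, p0)).2 = PySem.List.maxD dl (pvKey h) p0 := by
  cases dl with
  | nil => simp [PySem.List.maxD, PySem.List.max?]
  | cons x t =>
      have hx : 0 < pvKey h x := hpos x (by simp)
      have h1 : pvUpd h (0, p0) x = (pvKey h x, x) := by simp [pvUpd, hx]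
      obtain ⟨m', hm, hfold⟩ := pvUpd_fold_seeded h t x
      simp [List.foldl_cons, h1, hfold, PySem.List.maxD, hm]

-- ===== VERDICT (by name: the statement is the Claim_ definition above) =====
theorem find_lane_nearest_neighbors_spec : Claim_equal_find_lane_nearest_neighbors := by
  intro h ll lr m _ _
  unfold Spec_find_lane_nearest_neighbors
  unfold find_lane_nearest_neighbors find_lane_nearest_neighbors_alt
  simp only [pvLoopA_eq, pvLoopB_eq, List.nil_append]
  rw [pvUpd_fold_peak h _ ll (fun x hx => by
        rcases List.mem_flatMap.mp hx with ⟨i, _, hxi⟩; exact pvEL_pos h ll i x hxi),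
      pvUpd_fold_peak h _ lr (fun x hx => by
        rcases List.mem_flatMap.mp hx with ⟨i, _, hxi⟩; exact pvER_pos h lr _ i x hxi)]
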